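-- pv_equiv track=rewrite | github.com/Lin-Shy/PrincipiaBlastFoam | dataset/retrieval/analyze_retrieval_dataset.py | example_simple_retrieval_function
-- ===== SOURCE A (Python) =====
-- from typing import Dict, List, Set, Tuple, Callable
--
-- def example_simple_retrieval_function(query: str) -> List[str]:
--     """
--     Example retrieval function using simple keyword matching.
--     Replace this with your actual retrieval implementation.
--     """
--     query_lower = query.lower()
--
--     # Simple keyword-based routing
--     files = []
--
--     if any(word in query_lower for word in ['turbulence', 'ras', 'laminar', 'komega', 'kepsilon', 'spalart']):
--         files.append('constant/turbulenceProperties')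
--
--     if any(word in query_lower for word in ['endtime', 'maxco', 'deltat', 'time step', 'duration', 'courant']):
--         files.append('system/controlDict')
--
--     if any(word in query_lower for word in ['mesh', 'cells', 'blockmesh', 'resolution']):
--         files.append('system/blockMeshDict')
--
--     if any(word in query_lower for word in ['refinement', 'amr', 'adaptive']):
--         files.append('constant/dynamicMeshDict')
--
--     if any(word in query_lower for word in ['density', 'eos', 'equation of state', 'material', 'phase']):
--         files.append('constant/phaseProperties')
--
--     if any(word in query_lower for word in ['combustion', 'flame', 'reaction', 'arrhenius', 'equivalence']):
--         files.append('constant/combustionProperties')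
--
--     if any(word in query_lower for word in ['initial', 'charge', 'explosive', 'setfields']):
--         files.append('system/setFieldsDict')
--
--     if any(word in query_lower for word in ['scheme', 'discretization', 'muscl', 'limiter', 'vanleer']):
--         files.append('system/fvSchemes')
--
--     if any(word in query_lower for word in ['velocity', 'boundary']):
--         files.append('0/U')
--
--     if any(word in query_lower for word in ['write', 'output', 'format', 'interval']):
--         files.append('system/controlDict')
--
--     return list(set(files))  # Remove duplicates
-- ===== SOURCE B (Python) =====
-- # Different algorithm: instead of testing each keyword against the query with
-- # 'in' (A: ten grouped any() branches), B scans the QUERY once, position by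
-- # position, and uses a first-character index of the keywords to check only the
-- # few candidate keywords that can start at that position (naive multi-pattern
-- # text matching). Dedup via set, as in A.
--
-- _KEYWORD_FILES = [
--     ('turbulence', 'constant/turbulenceProperties'),
--     ('ras', 'constant/turbulenceProperties'),
--     ('laminar', 'constant/turbulenceProperties'),
--     ('komega', 'constant/turbulenceProperties'),
--     ('kepsilon', 'constant/turbulenceProperties'),
--     ('spalart', 'constant/turbulenceProperties'),
--     ('endtime', 'system/controlDict'),
--     ('maxco', 'system/controlDict'),
--     ('deltat', 'system/controlDict'),
--     ('time step', 'system/controlDict'),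
--     ('duration', 'system/controlDict'),
--     ('courant', 'system/controlDict'),
--     ('mesh', 'system/blockMeshDict'),
--     ('cells', 'system/blockMeshDict'),
--     ('blockmesh', 'system/blockMeshDict'),
--     ('resolution', 'system/blockMeshDict'),
--     ('refinement', 'constant/dynamicMeshDict'),
--     ('amr', 'constant/dynamicMeshDict'),
--     ('adaptive', 'constant/dynamicMeshDict'),
--     ('density', 'constant/phaseProperties'),
--     ('eos', 'constant/phaseProperties'),
--     ('equation of state', 'constant/phaseProperties'),
--     ('material', 'constant/phaseProperties'),
--     ('phase', 'constant/phaseProperties'),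
--     ('combustion', 'constant/combustionProperties'),
--     ('flame', 'constant/combustionProperties'),
--     ('reaction', 'constant/combustionProperties'),
--     ('arrhenius', 'constant/combustionProperties'),
--     ('equivalence', 'constant/combustionProperties'),
--     ('initial', 'system/setFieldsDict'),
--     ('charge', 'system/setFieldsDict'),
--     ('explosive', 'system/setFieldsDict'),
--     ('setfields', 'system/setFieldsDict'),
--     ('scheme', 'system/fvSchemes'),
--     ('discretization', 'system/fvSchemes'),
--     ('muscl', 'system/fvSchemes'),
--     ('limiter', 'system/fvSchemes'),
--     ('vanleer', 'system/fvSchemes'),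
--     ('velocity', '0/U'),
--     ('boundary', '0/U'),
--     ('write', 'system/controlDict'),
--     ('output', 'system/controlDict'),
--     ('format', 'system/controlDict'),
--     ('interval', 'system/controlDict'),
-- ]
--
-- # first-character index: char -> list of (keyword, file) starting with it
-- _INDEX = {}
-- for _w, _f in _KEYWORD_FILES:
--     _INDEX.setdefault(_w[0], []).append((_w, _f))
--
--
-- def example_simple_retrieval_function(query):
--     q = query.lower()
--     files = []
--     for i in range(len(q)):
--         for w, f in _INDEX.get(q[i], ()):
--             if q.startswith(w, i):
--                 files.append(f)
--     return list(set(files))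
-- ===== Notes on version B (the rewrite author's own statement) =====
-- stated objective: alternative
-- what changed: A tests each of its 45 keywords against the query with substring membership in ten grouped any() branches; B instead scans the query once, position by position, and at each position checks only the candidate keywords from a first-character index with startswith (naive multi-pattern text matching), then dedups via set exactly like A.
import Mathlib
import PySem

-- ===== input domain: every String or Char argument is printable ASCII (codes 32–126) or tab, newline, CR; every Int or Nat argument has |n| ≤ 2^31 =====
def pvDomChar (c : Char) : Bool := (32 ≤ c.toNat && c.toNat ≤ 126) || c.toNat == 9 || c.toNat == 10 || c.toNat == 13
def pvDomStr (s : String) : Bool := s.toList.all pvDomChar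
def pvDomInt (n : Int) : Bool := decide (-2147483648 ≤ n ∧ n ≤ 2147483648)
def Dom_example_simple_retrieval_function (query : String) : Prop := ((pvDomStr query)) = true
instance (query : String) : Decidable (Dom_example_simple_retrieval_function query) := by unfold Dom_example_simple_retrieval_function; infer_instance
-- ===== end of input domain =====

-- B replaces A's ten keyword-group 'any(w in query)' branches by a single left-to-right scan
-- of the query with a first-character index of the keywords (naive multi-pattern matching);
-- alternative algorithm, same result set. Both Pythons end in list(set(files)), whose order
-- CPython leaves to string hashing (the harness compares it as a set); both ports render that
-- set canonically as its sorted element list.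

-- ===== PORT A =====
def example_simple_retrieval_function (query : String) : List String :=
  let query_lower := PySem.Str.lower query
  let files : List String := []
  let files := if (["turbulence", "ras", "laminar", "komega", "kepsilon", "spalart"].any
      (fun w => PySem.Str.isIn w query_lower)) then files ++ ["constant/turbulenceProperties"] else files
  let files := if (["endtime", "maxco", "deltat", "time step", "duration", "courant"].any
      (fun w => PySem.Str.isIn w query_lower)) then files ++ ["system/controlDict"] else files
  let files := if (["mesh", "cells", "blockmesh", "resolution"].any
      (fun w => PySem.Str.isIn w query_lower)) then files ++ ["system/blockMeshDict"] else files
  let files := if (["refinement", "amr", "adaptive"].any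
      (fun w => PySem.Str.isIn w query_lower)) then files ++ ["constant/dynamicMeshDict"] else files
  let files := if (["density", "eos", "equation of state", "material", "phase"].any
      (fun w => PySem.Str.isIn w query_lower)) then files ++ ["constant/phaseProperties"] else files
  let files := if (["combustion", "flame", "reaction", "arrhenius", "equivalence"].any
      (fun w => PySem.Str.isIn w query_lower)) then files ++ ["constant/combustionProperties"] else files
  let files := if (["initial", "charge", "explosive", "setfields"].any
      (fun w => PySem.Str.isIn w query_lower)) then files ++ ["system/setFieldsDict"] else files
  let files := if (["scheme", "discretization", "muscl", "limiter", "vanleer"].any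
      (fun w => PySem.Str.isIn w query_lower)) then files ++ ["system/fvSchemes"] else files
  let files := if (["velocity", "boundary"].any
      (fun w => PySem.Str.isIn w query_lower)) then files ++ ["0/U"] else files
  let files := if (["write", "output", "format", "interval"].any
      (fun w => PySem.Str.isIn w query_lower)) then files ++ ["system/controlDict"] else files
  -- list(set(files)): Python's order is unspecified hash order (the harness compares as a set);
  -- rendered canonically as the sorted distinct elements (same rendering in port B)
  PySem.List.sorted (PySem.Set.ofList files) (fun x => x) false

-- ===== PORT B =====
def pvPairs : List (String × String) :=
  [ ("turbulence", "constant/turbulenceProperties"),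
    ("ras", "constant/turbulenceProperties"),
    ("laminar", "constant/turbulenceProperties"),
    ("komega", "constant/turbulenceProperties"),
    ("kepsilon", "constant/turbulenceProperties"),
    ("spalart", "constant/turbulenceProperties"),
    ("endtime", "system/controlDict"),
    ("maxco", "system/controlDict"),
    ("deltat", "system/controlDict"),
    ("time step", "system/controlDict"),
    ("duration", "system/controlDict"),
    ("courant", "system/controlDict"),
    ("mesh", "system/blockMeshDict"),
    ("cells", "system/blockMeshDict"),
    ("blockmesh", "system/blockMeshDict"),
    ("resolution", "system/blockMeshDict"),
    ("refinement", "constant/dynamicMeshDict"),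
    ("amr", "constant/dynamicMeshDict"),
    ("adaptive", "constant/dynamicMeshDict"),
    ("density", "constant/phaseProperties"),
    ("eos", "constant/phaseProperties"),
    ("equation of state", "constant/phaseProperties"),
    ("material", "constant/phaseProperties"),
    ("phase", "constant/phaseProperties"),
    ("combustion", "constant/combustionProperties"),
    ("flame", "constant/combustionProperties"),
    ("reaction", "constant/combustionProperties"),
    ("arrhenius", "constant/combustionProperties"),
    ("equivalence", "constant/combustionProperties"),
    ("initial", "system/setFieldsDict"),
    ("charge", "system/setFieldsDict"),
    ("explosive", "system/setFieldsDict"),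
    ("setfields", "system/setFieldsDict"),
    ("scheme", "system/fvSchemes"),
    ("discretization", "system/fvSchemes"),
    ("muscl", "system/fvSchemes"),
    ("limiter", "system/fvSchemes"),
    ("vanleer", "system/fvSchemes"),
    ("velocity", "0/U"),
    ("boundary", "0/U"),
    ("write", "system/controlDict"),
    ("output", "system/controlDict"),
    ("format", "system/controlDict"),
    ("interval", "system/controlDict") ]

-- _INDEX.setdefault(w[0], []).append((w, f)); keys are the keywords' first characters
-- (1-char Python strings ↔ Char, exact on this ASCII data; headD's default is never
-- used since every keyword is nonempty)
def pvIndex : PySem.Dict Char (List (String × String)) :=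
  pvPairs.foldl
    (fun d wf => PySem.Dict.modify d (wf.1.toList.headD ' ') [] (fun l => l ++ [wf]))
    PySem.Dict.empty

def example_simple_retrieval_function_alt (query : String) : List String :=
  let q := PySem.Str.lower query
  let qc := q.toList
  -- for i in range(len(q)): for (w, f) in _INDEX.get(q[i], ()): if q.startswith(w, i): files.append(f)
  -- q[i] is in range for i < len(q), so getD is exact; q.startswith(w, i) is startswith on q[i:]
  let files := (List.range qc.length).foldl
    (fun files i =>
      (PySem.Dict.getD pvIndex (qc.getD i ' ') []).foldl
        (fun files wf =>
          if PySem.Chars.startswith (qc.drop i) wf.1.toList then files ++ [wf.2] else files)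
        files)
    []
  -- list(set(files)): rendered canonically as the sorted distinct elements (same rendering in port A)
  PySem.List.sorted (PySem.Set.ofList files) (fun x => x) false

-- ===== PRECONDITION & SPEC =====
def Spec_example_simple_retrieval_function (query : String) (out : List String) : Prop := out = example_simple_retrieval_function_alt query
instance (query : String) (out : List String) : Decidable (Spec_example_simple_retrieval_function query out) := by unfold Spec_example_simple_retrieval_function; infer_instance

-- ===== CLAIM (what is proved, stated in full; the proofs are below) =====
def Claim_equal_example_simple_retrieval_function : Prop := ∀ (query : String), Dom_example_simple_retrieval_function query → Spec_example_simple_retrieval_function query (example_simple_retrieval_function query)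

-- ===== LEMMAS AND PROOFS =====

-- membership through one 'if matched: files.append(file)' step of A
theorem pv_mem_ite_append {b : Prop} [Decidable b] {l : List String} {x f : String} :
    (f ∈ if b then l ++ [x] else l) ↔ (f ∈ l ∨ (b ∧ f = x)) := by
  split_ifs with h <;> simp [h]

-- every keyword of pvPairs is nonempty
set_option maxRecDepth 100000 in
theorem pv_pairs_ne_nil : ∀ wf ∈ pvPairs, wf.1.toList ≠ [] := by decide

-- a pair is listed in the index bucket of its first character
set_option maxRecDepth 100000 in
theorem pv_pairs_mem_index :
    ∀ wf ∈ pvPairs, wf ∈ PySem.Dict.getD pvIndex (wf.1.toList.headD ' ') [] := by decide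

-- every pair found in any index bucket comes from pvPairs
set_option maxRecDepth 100000 in
theorem pv_index_mem_pairs :
    ∀ (c : Char) (wf : String × String), wf ∈ PySem.Dict.getD pvIndex c [] → wf ∈ pvPairs := by
  intro c wf h
  by_cases hc : PySem.Dict.contains pvIndex c = true
  · have hk : c ∈ PySem.Dict.keys pvIndex := (PySem.Dict.contains_iff_mem_keys _ _).mp hc
    have hkeys : PySem.Dict.keys pvIndex =
        ['t', 'r', 'l', 'k', 's', 'e', 'm', 'd', 'c', 'b', 'a', 'p', 'f', 'i', 'v', 'w', 'o'] := by
      decide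
    rw [hkeys] at hk
    simp only [List.mem_cons, List.not_mem_nil, or_false] at hk
    rcases hk with rfl | rfl | rfl | rfl | rfl | rfl | rfl | rfl | rfl | rfl | rfl | rfl | rfl | rfl | rfl | rfl | rfl <;>
      · revert wf; decide
  · rw [PySem.Dict.getD_of_not_contains _ _ (by simpa using hc)] at h
    simp at h

-- B's scan of the query collects f iff some keyword pair matches the query and maps to f
theorem pv_memB (qc : List Char) (f : String) :
    (f ∈ (List.range qc.length).foldl
      (fun files i =>
        (PySem.Dict.getD pvIndex (qc.getD i ' ') []).foldl
          (fun files wf =>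
            if PySem.Chars.startswith (qc.drop i) wf.1.toList then files ++ [wf.2] else files)
          files)
      []) ↔
    (∃ wf ∈ pvPairs, PySem.Chars.isIn wf.1.toList qc = true ∧ f = wf.2) := by
  rw [PySem.List.foldl_congr_mem (List.range qc.length) _
        (fun files i => files ++
          ((PySem.Dict.getD pvIndex (qc.getD i ' ') []).filter
              (fun wf => PySem.Chars.startswith (qc.drop i) wf.1.toList)).map Prod.snd) []
        (fun acc i _ => PySem.List.foldl_append_if _ _ _ _),
      PySem.List.foldl_append_eq_flatMap]
  simp only [List.nil_append, List.mem_flatMap, List.mem_range, List.mem_map, List.mem_filter]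
  constructor
  · rintro ⟨i, hi, wf, ⟨hwf, hsw⟩, rfl⟩
    refine ⟨wf, pv_index_mem_pairs _ _ hwf, ?_, rfl⟩
    exact (PySem.Chars.exists_prefix_drop_iff_isIn _ _).mp
      ⟨i, (PySem.Chars.startswith_iff _ _).mp hsw⟩
  · rintro ⟨wf, hwf, hin, rfl⟩
    obtain ⟨j, hpre⟩ := (PySem.Chars.exists_prefix_drop_iff_isIn wf.1.toList qc).mpr hin
    obtain ⟨h, t, hw⟩ : ∃ h t, wf.1.toList = h :: t := by
      rcases e : wf.1.toList with _ | ⟨h, t⟩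
      · exact absurd e (pv_pairs_ne_nil wf hwf)
      · exact ⟨h, t, rfl⟩
    rw [hw] at hpre
    obtain ⟨rest, hrest⟩ := hpre
    have hdrop : qc.drop j = h :: (t ++ rest) := by rw [← hrest]; simp
    have hjlt : j < qc.length := by
      by_contra hge
      have : qc.drop j = [] := List.drop_eq_nil_of_le (by omega)
      rw [this] at hdrop; exact absurd hdrop (by simp)
    have hget : qc.getD j ' ' = h := by
      rw [List.getD_eq_getElem?_getD]
      have : qc[j]? = (qc.drop j)[0]? := by rw [List.getElem?_drop]; norm_num
      rw [this, hdrop]; rfl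
    refine ⟨j, hjlt, wf, ⟨?_, ?_⟩, rfl⟩
    · have := pv_pairs_mem_index wf hwf
      rw [hw] at this
      rwa [hget]
    · rw [PySem.Chars.startswith_iff, hw, hdrop]
      exact ⟨rest, by simp⟩

-- ===== VERDICT (by name: the statement is the Claim_ definition above) =====
set_option maxHeartbeats 4000000 in
set_option maxRecDepth 100000 in
theorem example_simple_retrieval_function_spec : Claim_equal_example_simple_retrieval_function := by
  intro query _
  unfold Spec_example_simple_retrieval_function
  unfold example_simple_retrieval_function example_simple_retrieval_function_alt
  refine PySem.List.sorted_eq_sorted_of_perm _ _ _ (fun a b h => h) ?_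
  rw [List.perm_ext_iff_of_nodup (PySem.Set.nodup_ofList _) (PySem.Set.nodup_ofList _)]
  intro f
  rw [PySem.Set.mem_ofList, PySem.Set.mem_ofList, pv_memB]
  simp only [pv_mem_ite_append, List.not_mem_nil, false_or, List.any_eq_true, List.mem_cons,
    or_false, PySem.Str.isIn_eq, pvPairs]
  simp only [or_and_right, exists_or, exists_eq_left, or_assoc]
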